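-- pv_equiv track=rewrite | github.com/lubani/math | partitions.py | calculate_choice
-- ===== SOURCE A (Python) =====
-- import math
-- from collections import Counter
--
-- def calculate_choice(partition, letter_frequencies):
--     """
--     After selecting letters for a given frequency level, remove those letters completely
--     from the pool so they cannot be chosen again at another frequency level.
--     """
--     freq_counter = Counter(partition)
--     choice = 1
--
--     # We'll work with a list of frequencies, but we also need to keep track of distinct letters.
--     # Let's simulate that by turning frequencies into a list of 'letter slots'.
--     # Since exact letters don't matter, just imagine each frequency slot represents a distinct letter.
--     # For sorting stability and clarity, use a fixed size list of frequencies.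
--     freqs = sorted(letter_frequencies, reverse=True)
--
--     for f, needed_count in sorted(freq_counter.items(), reverse=True):
--         # Count how many letters have freq >= f
--         eligible = sum(lf >= f for lf in freqs)
--         if eligible < needed_count:
--             return 0
--
--         # Choose needed_count from eligible
--         comb_val = math.comb(eligible, needed_count)
--         choice *= comb_val
--
--         # Remove chosen letters completely
--         # We must remove the chosen letters from freqs, not just subtract frequency.
--         # Sort frequencies descending, pick the top eligible letters for removal.
--         chosen = 0
--         new_freqs = []
--         for lf in freqs:
--             if lf >= f and chosen < needed_count:
--                 # This letter is now chosen and cannot be reused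
--                 chosen += 1
--                 # Do not add it back to new_freqs at all (fully remove it)
--             else:
--                 new_freqs.append(lf)
--         freqs = sorted(new_freqs, reverse=True)
--
--     return choice
-- ===== SOURCE B (Python) =====
-- import math
-- from bisect import bisect_left
-- from collections import Counter
--
-- def calculate_choice(partition, letter_frequencies):
--     # Sort the pool once (ascending); instead of rebuilding/re-sorting the pool at
--     # each level, count eligible letters via bisect and a running 'removed' total.
--     freqs = sorted(letter_frequencies)
--     n = len(freqs)
--     removed = 0
--     choice = 1
--     for f, c in sorted(Counter(partition).items(), reverse=True):
--         eligible = n - bisect_left(freqs, f) - removed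
--         if eligible < c:
--             return 0
--         choice *= math.comb(eligible, c)
--         removed += c
--     return choice
-- ===== Notes on version B (the rewrite author's own statement) =====
-- stated objective: alternative
-- what changed: Instead of rebuilding and re-sorting the letter pool at every frequency level and counting eligible letters by a linear scan, B sorts the pool once ascending and computes the eligible count per level as n - bisect_left(freqs, f) - removed, maintaining only a running total of removed letters.
import Mathlib
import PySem

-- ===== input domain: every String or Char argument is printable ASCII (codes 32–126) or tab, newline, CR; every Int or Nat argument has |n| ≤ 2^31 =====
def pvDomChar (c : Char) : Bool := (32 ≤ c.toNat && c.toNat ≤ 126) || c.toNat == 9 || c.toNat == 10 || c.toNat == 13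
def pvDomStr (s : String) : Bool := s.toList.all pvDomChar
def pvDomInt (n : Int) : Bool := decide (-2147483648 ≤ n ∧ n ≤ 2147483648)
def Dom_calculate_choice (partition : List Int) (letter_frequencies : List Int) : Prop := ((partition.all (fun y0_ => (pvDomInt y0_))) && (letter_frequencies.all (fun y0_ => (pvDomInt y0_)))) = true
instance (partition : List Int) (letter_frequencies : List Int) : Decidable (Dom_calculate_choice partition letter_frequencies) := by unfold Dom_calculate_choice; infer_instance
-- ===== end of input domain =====

-- B sorts the letter pool once and replaces A's per-level pool rebuild/re-sort by a
-- bisect count plus a running removed-total (objective: alternative algorithm).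

-- ===== PORT A =====
-- A's inner removal loop: 'for lf in freqs: if lf >= f and chosen < needed_count: …'
def pvAinner (f needed_count : Int) (p : Int × List Int) (lf : Int) : Int × List Int :=
  if lf ≥ f ∧ p.1 < needed_count then (p.1 + 1, p.2) else (p.1, p.2 ++ [lf])

-- body of A's 'for f, needed_count in sorted(freq_counter.items(), reverse=True)' loop
def pvAbody (fc : Int × Int) (st : List Int × Int) : Option (List Int × Int) :=
  let freqs := st.1
  let f := fc.1
  let needed_count := fc.2
  let eligible : Int := (freqs.map (fun lf => if lf ≥ f then (1 : Int) else 0)).sum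
  if eligible < needed_count then none   -- 'return 0'
  else
    let comb_val : Int := (eligible.toNat.choose needed_count.toNat : Int)  -- math.comb
    let choice := st.2 * comb_val
    let r := freqs.foldl (pvAinner f needed_count) ((0 : Int), ([] : List Int))
    some (PySem.List.sorted r.2 (fun x => x) true, choice)

-- none = the loop body executed 'return 0'
def pvAstep (st : Option (List Int × Int)) (fc : Int × Int) : Option (List Int × Int) :=
  match st with
  | none => none
  | some s => pvAbody fc s

def calculate_choice (partition : List Int) (letter_frequencies : List Int) : Int :=
  let freq_counter := PySem.Dict.counter partition
  let choice : Int := 1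
  let freqs := PySem.List.sorted letter_frequencies (fun x => x) true
  let st := (PySem.List.sorted2 freq_counter.items (fun p => p.1) (fun p => p.2) true).foldl
      pvAstep (some (freqs, choice))
  match st with
  | none => 0
  | some s => s.2

-- ===== PORT B =====
-- body of B's loop: eligible = n - bisect_left(freqs, f) - removed
def pvBbody (freqs : List Int) (fc : Int × Int) (st : Int × Int) : Option (Int × Int) :=
  let eligible : Int := (freqs.length : Int) - (PySem.List.bisectLeft freqs fc.1 : Int) - st.1
  if eligible < fc.2 then none   -- 'return 0'
  else some (st.1 + fc.2, st.2 * (eligible.toNat.choose fc.2.toNat : Int))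

-- none = the loop body executed 'return 0'
def pvBstep (freqs : List Int) (st : Option (Int × Int)) (fc : Int × Int) : Option (Int × Int) :=
  match st with
  | none => none
  | some s => pvBbody freqs fc s

def calculate_choice_alt (partition : List Int) (letter_frequencies : List Int) : Int :=
  let freqs := PySem.List.sorted letter_frequencies (fun x => x) false
  let st := (PySem.List.sorted2 (PySem.Dict.counter partition).items (fun p => p.1) (fun p => p.2) true).foldl
      (pvBstep freqs) (some ((0 : Int), (1 : Int)))
  match st with
  | none => 0
  | some s => s.2

-- ===== PRECONDITION & SPEC =====
def Spec_calculate_choice (partition : List Int) (letter_frequencies : List Int) (out : Int) : Prop := out = calculate_choice_alt partition letter_frequencies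
instance (partition : List Int) (letter_frequencies : List Int) (out : Int) : Decidable (Spec_calculate_choice partition letter_frequencies out) := by unfold Spec_calculate_choice; infer_instance

-- ===== CLAIM (what is proved, stated in full; the proofs are below) =====
def Claim_equal_calculate_choice : Prop := ∀ (partition : List Int) (letter_frequencies : List Int), Dom_calculate_choice partition letter_frequencies → Spec_calculate_choice partition letter_frequencies (calculate_choice partition letter_frequencies)

-- ===== LEMMAS AND PROOFS =====

-- the two sorted views of the letter pool
def pvD (lf : List Int) : List Int := PySem.List.sorted lf (fun x => x) true
def pvS (lf : List Int) : List Int := PySem.List.sorted lf (fun x => x) false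

-- insertBy only looks at comparisons of the inserted element with list members
lemma pv_insertBy_congr {α : Type} (b1 b2 : α → α → Bool) (x : α) :
    ∀ ys : List α, (∀ y ∈ ys, b1 x y = b2 x y) →
      PySem.List.insertBy b1 x ys = PySem.List.insertBy b2 x ys := by
  intro ys
  induction ys with
  | nil => intro _; rfl
  | cons y ys ih =>
    intro h
    simp only [PySem.List.insertBy]
    rw [h y (by simp)]
    by_cases hb : b2 x y
    · simp [hb]
    · simp [hb, ih (fun z hz => h z (by simp [hz]))]

lemma pv_foldl_insertBy_congr {α : Type} (b1 b2 : α → α → Bool) :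
    ∀ (l acc : List α), (∀ x ∈ l, ∀ y ∈ acc, b1 x y = b2 x y) →
      (∀ x ∈ l, ∀ y ∈ l, b1 x y = b2 x y) →
      l.foldl (fun acc x => PySem.List.insertBy b1 x acc) acc
        = l.foldl (fun acc x => PySem.List.insertBy b2 x acc) acc := by
  intro l
  induction l with
  | nil => intro _ _ _; rfl
  | cons x l ih =>
    intro acc hacc hl
    simp only [List.foldl]
    rw [pv_insertBy_congr b1 b2 x acc (hacc x (by simp))]
    apply ih
    · intro z hz y hy
      rw [PySem.List.mem_insertBy] at hy
      rcases hy with rfl | hy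
      · exact hl z (by simp [hz]) y (by simp)
      · exact hacc z (by simp [hz]) y hy
    · intro z hz y hy
      exact hl z (by simp [hz]) y (by simp [hy])

-- sorting by the lexicographic pair key equals sorting by the first key when the
-- first key is injective on the list's members
lemma pv_sorted2_eq_sorted_fst (xs : List (Int × Int))
    (h : ∀ p ∈ xs, ∀ q ∈ xs, p.1 = q.1 → p = q) :
    PySem.List.sorted2 xs (fun p => p.1) (fun p => p.2) true
      = PySem.List.sorted xs (fun p => p.1) true := by
  simp only [PySem.List.sorted2, PySem.List.sorted, if_pos]
  apply pv_foldl_insertBy_congr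
  · intro x _ y hy; simp at hy
  · intro p hp q hq
    rcases lt_trichotomy q.1 p.1 with hlt | heq | hgt
    · simp [hlt, not_lt.mpr (le_of_lt hlt)]
    · have : q = p := h q hq p hp heq
      subst this
      simp
    · simp [hgt, not_lt.mpr (le_of_lt hgt)]

-- the level list is strictly decreasing in the frequency
lemma pv_L0_pairwise (partition : List Int) :
    ((PySem.List.sorted (PySem.Set.ofList partition) (fun x => x) true).map
        (fun k => (k, (partition.count k : Int)))).Pairwise
      (fun p q : Int × Int => q.1 < p.1) := by
  rw [List.pairwise_map]
  have hle := PySem.List.sorted_pairwise_rev (PySem.Set.ofList partition) (fun x => x)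
  have hnd : (PySem.List.sorted (PySem.Set.ofList partition) (fun x => x) true).Nodup :=
    (PySem.List.sorted_perm _ _ _).nodup_iff.mpr (PySem.Set.nodup_ofList partition)
  exact (hle.and hnd).imp (fun {a b} hab => lt_of_le_of_ne hab.1 (Ne.symm hab.2))

-- every count in the level list is at least 1
lemma pv_L0_counts (partition : List Int) :
    ∀ p ∈ (PySem.List.sorted (PySem.Set.ofList partition) (fun x => x) true).map
        (fun k => (k, (partition.count k : Int))), 1 ≤ p.2 := by
  intro p hp
  rw [List.mem_map] at hp
  obtain ⟨k, hk, rfl⟩ := hp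
  have hk' : k ∈ partition := by
    rw [← PySem.Set.mem_ofList partition k]
    exact (PySem.List.sorted_perm _ _ _).mem_iff.mp hk
  have hpos : 0 < partition.count k := List.count_pos_iff.mpr hk'
  simp only []
  exact_mod_cast hpos

-- the level list of both ports: counter keys sorted descending, paired with counts
lemma pv_levels_eq (partition : List Int) :
    PySem.List.sorted2 (PySem.Dict.counter partition).items (fun p => p.1) (fun p => p.2) true
      = (PySem.List.sorted (PySem.Set.ofList partition) (fun x => x) true).map
          (fun k => (k, (partition.count k : Int))) := by
  rw [pv_sorted2_eq_sorted_fst]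
  · apply PySem.List.sorted_rev_eq_of_perm_of_pairwise_gt
    · rw [PySem.Dict.items_counter]
      exact (PySem.List.sorted_perm _ _ _).map _
    · exact pv_L0_pairwise partition
  · intro p hp q hq hpq
    rw [PySem.Dict.items_counter] at hp hq
    rw [List.mem_map] at hp hq
    obtain ⟨k, _, rfl⟩ := hp
    obtain ⟨k', _, rfl⟩ := hq
    simp only at hpq
    subst hpq
    rfl

-- A's 0/1 generator sum is a countP
lemma pv_eligible_eq_countP (f : Int) (M : List Int) :
    (M.map (fun lf => if lf ≥ f then (1 : Int) else 0)).sum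
      = (M.countP (fun x => f ≤ x) : Int) := by
  have := PySem.List.sum_map_ite_one_zero (fun x : Int => decide (f ≤ x)) M
  simpa using this

-- descending and ascending sorts count alike
lemma pv_countP_sortedD (lf : List Int) (f : Int) :
    (pvD lf).countP (fun x => f ≤ x) = (pvS lf).countP (fun x => f ≤ x) := by
  unfold pvD pvS
  exact List.Perm.countP_eq _
    ((PySem.List.sorted_perm lf (fun x => x) true).trans
      (PySem.List.sorted_perm lf (fun x => x) false).symm)

-- bisect bridge: on the ascending sort, n - bisect_left counts the elements ≥ f
lemma pv_bisect_countP (lf : List Int) (f : Int) :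
    (pvS lf).countP (fun x => f ≤ x) + PySem.List.bisectLeft (pvS lf) f = lf.length := by
  have hp : (pvS lf).Pairwise (fun a b => a ≤ b) := PySem.List.sorted_pairwise lf (fun x => x)
  obtain ⟨hle, hlt, hge⟩ := PySem.List.bisectLeft_spec (pvS lf) f hp
  set i := PySem.List.bisectLeft (pvS lf) f with hi
  have hlen : (pvS lf).length = lf.length := PySem.List.length_sorted lf (fun x => x) false
  have hsplit : (pvS lf).countP (fun x => f ≤ x)
      = ((pvS lf).take i).countP (fun x => f ≤ x) + ((pvS lf).drop i).countP (fun x => f ≤ x) := by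
    conv_lhs => rw [← List.take_append_drop i (pvS lf)]
    exact List.countP_append
  have h1 : ((pvS lf).take i).countP (fun x => f ≤ x) = 0 := by
    rw [List.countP_eq_zero]
    intro a ha
    rw [List.mem_take_iff_getElem] at ha
    obtain ⟨j, hj, rfl⟩ := ha
    have := hlt j (by omega) (by omega)
    simp at this ⊢
    omega
  have h2 : ((pvS lf).drop i).countP (fun x => f ≤ x) = ((pvS lf).drop i).length := by
    rw [List.countP_eq_length]
    intro a ha
    rw [List.mem_drop_iff_getElem] at ha
    obtain ⟨j, hj, rfl⟩ := ha
    have := hge (i + j) (by omega) (by omega)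
    simpa using this
  rw [hsplit, h1, h2, List.length_drop]
  omega

-- head of a descending list with an eligible member is itself eligible
lemma pv_head_pred (f x : Int) (M' : List Int) (hx : ∀ y ∈ M', y ≤ x)
    (hpos : 0 < (x :: M').countP (fun y => f ≤ y)) : f ≤ x := by
  by_contra hfx
  have h0 : (x :: M').countP (fun y => f ≤ y) = 0 := by
    rw [List.countP_eq_zero]
    intro a ha
    rcases List.mem_cons.mp ha with rfl | ha'
    · simpa using hfx
    · have := hx a ha'
      simp only [decide_eq_true_eq]
      omega
  omega

-- A's removal loop on a descending list with at least c eligible drops the first c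
lemma pv_removeFold (f c : Int) :
    ∀ (M : List Int) (j : Int) (acc : List Int),
      M.Pairwise (fun a b => b ≤ a) → 0 ≤ j → j ≤ c →
      (c - j).toNat ≤ M.countP (fun x => f ≤ x) →
      (M.foldl (pvAinner f c) (j, acc)).2 = acc ++ M.drop (c - j).toNat := by
  intro M
  induction M with
  | nil => intro j acc _ _ _ _; simp
  | cons x M' ih =>
    intro j acc hpw hj0 hjc hcount
    rw [List.pairwise_cons] at hpw
    obtain ⟨hx, hpw'⟩ := hpw
    simp only [List.foldl]
    by_cases hjlt : j < c
    · have hfx : f ≤ x := by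
        apply pv_head_pred f x M' hx
        omega
      rw [show pvAinner f c (j, acc) x = (j + 1, acc) from if_pos ⟨hfx, hjlt⟩]
      have hc' : (x :: M').countP (fun y => f ≤ y) = M'.countP (fun y => f ≤ y) + 1 :=
        List.countP_cons_of_pos (by simpa using hfx)
      rw [ih (j + 1) acc hpw' (by omega) (by omega) (by omega)]
      congr 1
      have hsucc : (c - j).toNat = (c - (j + 1)).toNat + 1 := by omega
      rw [hsucc, List.drop_succ_cons]
    · rw [show pvAinner f c (j, acc) x = (j, acc ++ [x]) from if_neg (by
        rintro ⟨_, h⟩; omega)]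
      have h0 : (c - j).toNat = 0 := by omega
      rw [ih j (acc ++ [x]) hpw' hj0 hjc (by omega), h0]
      simp

-- the first m elements of a descending list with ≥ m eligible are all ≥ f
lemma pv_take_pred (f : Int) :
    ∀ (M : List Int) (m : Nat), M.Pairwise (fun a b => b ≤ a) →
      m ≤ M.countP (fun x => f ≤ x) → ∀ x ∈ M.take m, f ≤ x := by
  intro M
  induction M with
  | nil => intro m _ _ x hx; simp at hx
  | cons y M' ih =>
    intro m hpw hm x hx
    rw [List.pairwise_cons] at hpw
    obtain ⟨hy, hpw'⟩ := hpw
    cases m with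
    | zero => simp at hx
    | succ m' =>
      have hfy : f ≤ y := pv_head_pred f y M' hy (by omega)
      have hc' : (y :: M').countP (fun z => f ≤ z) = M'.countP (fun z => f ≤ z) + 1 :=
        List.countP_cons_of_pos (by simpa using hfy)
      rw [List.take_succ_cons] at hx
      rcases List.mem_cons.mp hx with rfl | hx'
      · exact hfy
      · exact ih m' hpw' (by omega) x hx'

-- once the fold state is none ('return 0') it stays none
lemma pv_foldl_none {σ α : Type} (g : Option σ → α → Option σ)
    (hg : ∀ x, g none x = none) (l : List α) : l.foldl g none = none := by
  induction l with
  | nil => rfl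
  | cons x l ih => simp only [List.foldl, hg]; exact ih

-- main invariant: A's fold, started with the descending pool minus its first m
-- letters, tracks B's fold started with removed = m
lemma pv_main (lf : List Int) :
    ∀ (L : List (Int × Int)) (m : Nat) (ch : Int),
      m ≤ lf.length →
      L.Pairwise (fun p q => q.1 < p.1) →
      (∀ p ∈ L, 1 ≤ p.2) →
      (∀ x ∈ (pvD lf).take m, ∀ p ∈ L, p.1 ≤ x) →
      L.foldl pvAstep (some ((pvD lf).drop m, ch))
        = Option.map (fun rc : Int × Int => ((pvD lf).drop rc.1.toNat, rc.2))
            (L.foldl (pvBstep (pvS lf)) (some ((m : Int), ch))) := by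
  intro L
  induction L with
  | nil =>
    intro m ch _ _ _ _
    simp [List.foldl, Option.map]
  | cons fc L' ih =>
    obtain ⟨f, c⟩ := fc
    intro m ch hm hpw hcnt htake
    rw [List.pairwise_cons] at hpw
    obtain ⟨hhd, hpw'⟩ := hpw
    have hlenD : (pvD lf).length = lf.length := PySem.List.length_sorted _ _ _
    have hlenS : (pvS lf).length = lf.length := PySem.List.length_sorted _ _ _
    have hpwD : (pvD lf).Pairwise (fun a b => b ≤ a) := PySem.List.sorted_pairwise_rev lf (fun x => x)
    have hpwM : ((pvD lf).drop m).Pairwise (fun a b => b ≤ a) := hpwD.sublist (List.drop_sublist m (pvD lf))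
    have htakef : ∀ x ∈ (pvD lf).take m, f ≤ x := fun x hx => htake x hx (f, c) (by simp)
    have hcountD : (pvD lf).countP (fun x => f ≤ x) = m + ((pvD lf).drop m).countP (fun x => f ≤ x) := by
      conv_lhs => rw [← List.take_append_drop m (pvD lf), List.countP_append]
      have h1 : ((pvD lf).take m).countP (fun x => f ≤ x) = ((pvD lf).take m).length := by
        rw [List.countP_eq_length]; intro a ha; simpa using htakef a ha
      rw [h1, List.length_take]; omega
    have hc1 : (1 : Int) ≤ c := hcnt (f, c) (by simp)
    have hbis := pv_bisect_countP lf f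
    have hDS := pv_countP_sortedD lf f
    have hEB : ((pvS lf).length : Int) - (PySem.List.bisectLeft (pvS lf) f : Int) - (m : Int)
        = (((pvD lf).drop m).countP (fun x => f ≤ x) : Int) := by omega
    have hMlen : ((pvD lf).drop m).countP (fun x => f ≤ x) ≤ ((pvD lf).drop m).length :=
      List.countP_le_length
    set E : Int := (((pvD lf).drop m).countP (fun x => f ≤ x) : Int) with hE
    have hA : pvAbody (f, c) ((pvD lf).drop m, ch)
        = if E < c then none
          else some (PySem.List.sorted
              (((pvD lf).drop m).foldl (pvAinner f c) ((0 : Int), ([] : List Int))).2 (fun x => x) true,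
            ch * (E.toNat.choose c.toNat : Int)) := by
      simp only [pvAbody, pv_eligible_eq_countP, ← hE]
    have hB : pvBbody (pvS lf) (f, c) ((m : Int), ch)
        = if E < c then none
          else some ((m : Int) + c, ch * (E.toNat.choose c.toNat : Int)) := by
      simp only [pvBbody, hEB]
    simp only [List.foldl, pvAstep, pvBstep, hA, hB]
    by_cases hElt : E < c
    · rw [if_pos hElt, if_pos hElt, pv_foldl_none pvAstep (fun _ => rfl) L',
        pv_foldl_none (pvBstep (pvS lf)) (fun _ => rfl) L']
      rfl
    · rw [if_neg hElt, if_neg hElt]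
      have hcM : c.toNat ≤ ((pvD lf).drop m).countP (fun x => f ≤ x) := by omega
      have hrem := pv_removeFold f c ((pvD lf).drop m) 0 [] hpwM le_rfl (by omega) (by omega)
      rw [show c - 0 = c from by omega] at hrem
      rw [hrem]
      simp only [List.nil_append, List.drop_drop]
      have hpwMM : ((pvD lf).drop (m + c.toNat)).Pairwise (fun a b => b ≤ a) :=
        hpwD.sublist (List.drop_sublist _ (pvD lf))
      rw [PySem.List.sorted_rev_eq_self_of_pairwise _ _ hpwMM]
      have hcast : (m : Int) + c = ((m + c.toNat : Nat) : Int) := by omega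
      rw [hcast]
      apply ih (m + c.toNat) (ch * (E.toNat.choose c.toNat : Int))
      · rw [List.length_drop] at hMlen
        omega
      · exact hpw'
      · intro p hp; exact hcnt p (by simp [hp])
      · intro x hx p hp
        rw [List.take_add] at hx
        rcases List.mem_append.mp hx with hx' | hx'
        · exact htake x hx' p (by simp [hp])
        · have hfx : f ≤ x := pv_take_pred f ((pvD lf).drop m) c.toNat hpwM hcM x hx'
          have := hhd p hp
          omega

-- ===== VERDICT (by name: the statement is the Claim_ definition above) =====
theorem calculate_choice_spec : Claim_equal_calculate_choice := by
  intro partition lf _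
  unfold Spec_calculate_choice calculate_choice calculate_choice_alt
  simp only [pv_levels_eq]
  have hD : PySem.List.sorted lf (fun x => x) true = pvD lf := rfl
  have hS : PySem.List.sorted lf (fun x => x) false = pvS lf := rfl
  rw [hD, hS]
  have hmain := pv_main lf
      ((PySem.List.sorted (PySem.Set.ofList partition) (fun x => x) true).map
        (fun k => (k, (partition.count k : Int)))) 0 1 (Nat.zero_le _)
      (pv_L0_pairwise partition) (pv_L0_counts partition) (by simp)
  simp only [List.drop_zero, Nat.cast_zero] at hmain
  rw [hmain]
  cases ((PySem.List.sorted (PySem.Set.ofList partition) (fun x => x) true).map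
        (fun k => (k, (partition.count k : Int)))).foldl (pvBstep (pvS lf)) (some ((0 : Int), (1 : Int))) with
  | none => rfl
  | some s => rfl
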